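-- pv_equiv track=rewrite | github.com/peipei82417/BulkFolderRenameTool | initialScript.py | joinPrefix
-- ===== SOURCE A (Python) =====
-- def joinPrefix(prefix, list2D):
--     newList = []
--     for pf in prefix:
--         for l in list2D:
--             newStr = []
--             for s in l:
--                 newStr.append(pf + s)
--             if len(l) > 0:
--                 newList.append("".join(newStr))
--     return newList
-- ===== SOURCE B (Python) =====
-- def joinPrefix(prefix, list2D):
--     # Transposed traversal: walk the rows once (outer), and for each non-empty
--     # row render one string per prefix into that prefix's bucket; finally
--     # flatten the buckets in prefix order, which restores A's prefix-major order.
--     buckets = [[] for _ in prefix]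
--     for l in list2D:
--         if len(l) > 0:
--             for bucket, pf in zip(buckets, prefix):
--                 bucket.append(pf + pf.join(l))
--     result = []
--     for bucket in buckets:
--         result.extend(bucket)
--     return result
-- ===== Notes on version B (the rewrite author's own statement) =====
-- stated objective: alternative
-- what changed: Transposes the traversal: instead of A's prefix-outer nested loops building each string piece by piece into a newStr buffer, B walks the rows once, renders pf + pf.join(l) for every prefix into per-prefix buckets, and flattens the buckets in prefix order; str.join replaces the per-element append+concat buffer.
import Mathlib
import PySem

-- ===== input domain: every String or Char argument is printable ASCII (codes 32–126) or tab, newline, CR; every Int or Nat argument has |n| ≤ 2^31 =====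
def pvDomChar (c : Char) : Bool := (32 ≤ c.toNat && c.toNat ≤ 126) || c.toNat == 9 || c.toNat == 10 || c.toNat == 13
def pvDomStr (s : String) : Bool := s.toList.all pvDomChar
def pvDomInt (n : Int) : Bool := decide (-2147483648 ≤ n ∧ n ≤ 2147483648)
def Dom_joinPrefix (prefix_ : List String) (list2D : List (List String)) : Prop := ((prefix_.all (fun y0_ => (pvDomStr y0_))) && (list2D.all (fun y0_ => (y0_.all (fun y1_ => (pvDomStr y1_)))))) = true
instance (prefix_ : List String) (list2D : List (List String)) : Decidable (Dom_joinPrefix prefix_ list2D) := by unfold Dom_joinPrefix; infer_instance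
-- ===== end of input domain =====

-- B transposes the traversal: one pass over the rows filling per-prefix buckets
-- (rendering each output as pf + pf.join(l)), then flattens buckets in prefix order.

-- ===== PORT A =====
def joinPrefix (prefix_ : List String) (list2D : List (List String)) : List String :=
  prefix_.foldl (fun newList pf =>
    list2D.foldl (fun newList l =>
      let newStr := l.foldl (fun newStr s => newStr ++ [pf ++ s]) []
      if l.length > 0 then newList ++ [PySem.Str.join "" newStr] else newList)
      newList)
    []

-- ===== PORT B =====
-- buckets are (bucket, pf) pairs, mirroring zip(buckets, prefix) in Source B
def joinPrefix_alt (prefix_ : List String) (list2D : List (List String)) : List String :=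
  let buckets :=
    list2D.foldl (fun bs l =>
      if l.length > 0 then
        bs.map (fun bp => (bp.1 ++ [bp.2 ++ PySem.Str.join bp.2 l], bp.2))
      else bs)
      (prefix_.map (fun pf => (([] : List String), pf)))
  buckets.foldl (fun result bp => result ++ bp.1) []

-- ===== PRECONDITION & SPEC =====
def Spec_joinPrefix (prefix_ : List String) (list2D : List (List String)) (out : List String) : Prop := out = joinPrefix_alt prefix_ list2D
instance (prefix_ : List String) (list2D : List (List String)) (out : List String) : Decidable (Spec_joinPrefix prefix_ list2D out) := by unfold Spec_joinPrefix; infer_instance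

-- ===== CLAIM (what is proved, stated in full; the proofs are below) =====
def Claim_equal_joinPrefix : Prop := ∀ (prefix_ : List String) (list2D : List (List String)), Dom_joinPrefix prefix_ list2D → Spec_joinPrefix prefix_ list2D (joinPrefix prefix_ list2D)

-- ===== LEMMAS AND PROOFS =====

lemma chars_join_map (pf : List Char) (l : List (List Char)) (h : l ≠ []) :
    PySem.Chars.join [] (l.map (fun s => pf ++ s)) = pf ++ PySem.Chars.join pf l := by
  induction l with
  | nil => exact absurd rfl h
  | cons x xs ih =>
    cases xs with
    | nil => simp [PySem.Chars.join_singleton]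
    | cons y ys =>
      rw [List.map_cons, List.map_cons, PySem.Chars.join_cons_cons,
        PySem.Chars.join_cons_cons, ← List.map_cons, ih (by simp)]
      simp

lemma str_join_map (pf : String) (l : List String) (h : l ≠ []) :
    PySem.Str.join "" (l.map (fun s => pf ++ s)) = pf ++ PySem.Str.join pf l := by
  apply String.toList_injective
  simp only [PySem.Str.toList_join, String.toList_append, List.map_map]
  have : (List.map String.toList l).map (fun s => pf.toList ++ s)
      = l.map (String.toList ∘ fun s => pf ++ s) := by
    simp
  rw [show ("" : String).toList = [] from rfl, ← this,
    chars_join_map pf.toList (l.map String.toList) (by simpa using h)]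

-- the canonical value both ports compute
def renderRows (pf : String) (rows : List (List String)) : List String :=
  (rows.filter (fun l => l.length > 0)).map (fun l => pf ++ PySem.Str.join pf l)

lemma newStr_eq (pf : String) (l : List String) :
    l.foldl (fun newStr s => newStr ++ [pf ++ s]) [] = l.map (fun s => pf ++ s) := by
  rw [PySem.List.foldl_append_eq_flatMap]
  induction l <;> simp_all [List.flatMap]

lemma inner_loop (pf : String) (list2D : List (List String)) (acc : List String) :
    list2D.foldl (fun newList l =>
        let newStr := l.foldl (fun newStr s => newStr ++ [pf ++ s]) []
        if l.length > 0 then newList ++ [PySem.Str.join "" newStr] else newList) acc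
      = acc ++ renderRows pf list2D := by
  induction list2D generalizing acc with
  | nil => simp [renderRows]
  | cons l rest ih =>
    simp only [List.foldl_cons, List.filter_cons, renderRows] at *
    by_cases h : l.length > 0
    · rw [if_pos h, ih, newStr_eq, str_join_map pf l (by rintro rfl; simp at h)]
      simp [h]
    · rw [if_neg h, ih]
      simp [h]

lemma joinPrefix_canonical (prefix_ : List String) (list2D : List (List String)) :
    joinPrefix prefix_ list2D = prefix_.flatMap (fun pf => renderRows pf list2D) := by
  unfold joinPrefix
  induction prefix_ using List.reverseRecOn with
  | nil => simp
  | append_singleton ps pf ih =>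
    rw [List.foldl_append, List.foldl_cons, List.foldl_nil, ih, inner_loop, List.flatMap_append]
    simp [List.flatMap]

lemma fold_buckets (rows : List (List String)) (bs : List (List String × String)) :
    rows.foldl (fun bs l =>
        if l.length > 0 then
          bs.map (fun bp => (bp.1 ++ [bp.2 ++ PySem.Str.join bp.2 l], bp.2))
        else bs) bs
      = bs.map (fun bp => (bp.1 ++ renderRows bp.2 rows, bp.2)) := by
  induction rows generalizing bs with
  | nil => simp [renderRows]
  | cons l rest ih =>
    simp only [List.foldl_cons, renderRows, List.filter_cons] at *
    by_cases h : l.length > 0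
    · rw [if_pos h, ih]
      simp [h, List.map_map, Function.comp_def]
    · rw [if_neg h, ih]
      simp [h]

lemma fold_concat (xs : List (List String × String)) (acc : List String) :
    xs.foldl (fun result bp => result ++ bp.1) acc = acc ++ xs.flatMap (fun bp => bp.1) := by
  induction xs generalizing acc with
  | nil => simp
  | cons x xs ih => simp [ih]

lemma joinPrefix_alt_canonical (prefix_ : List String) (list2D : List (List String)) :
    joinPrefix_alt prefix_ list2D = prefix_.flatMap (fun pf => renderRows pf list2D) := by
  unfold joinPrefix_alt
  rw [fold_buckets, fold_concat, List.map_map, List.flatMap_map]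
  simp

-- ===== VERDICT (by name: the statement is the Claim_ definition above) =====
theorem joinPrefix_spec : Claim_equal_joinPrefix := by
  intro prefix_ list2D _
  unfold Spec_joinPrefix
  rw [joinPrefix_canonical, joinPrefix_alt_canonical]
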